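-- pv_equiv track=rewrite | github.com/shahidtamboli-2505/Shahid-Intern-project-1 | backend/db.py | _leaders_to_case2_management
-- ===== SOURCE A (Python) =====
-- from typing import Any, Dict, List, Optional
--
-- def _norm_text(x: Any) -> str:
--     s = "" if x is None else str(x)
--     return " ".join(s.strip().split())
--
-- BUCKETS = [
--     "Executive Leadership",
--     "Technology / Operations",
--     "Finance / Administration",
--     "Business Development / Growth",
--     "Marketing / Branding",
-- ]
--
-- def _empty_case2_management() -> Dict[str, Dict[str, str]]:
--     return {b: {"name": "", "designation": ""} for b in BUCKETS}
--
-- def _map_role_to_bucket(role: str) -> str: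
--     r = _norm_text(role).lower()
--     if not r:
--         return ""
--
--     # Executive
--     if any(k in r for k in [
--         "founder", "co-founder", "cofounder", "ceo", "chief executive",
--         "managing director", "executive director", "director",
--         "chairman", "chairperson", "president", "owner", "proprietor",
--         "principal", "dean", "medical director", "clinical director",
--     ]):
--         return "Executive Leadership"
--
--     # Tech/Ops
--     if any(k in r for k in [
--         "cto", "chief technology", "cio", "chief information",
--         "coo", "chief operating", "operations", "it", "technical",
--         "head of operations", "plant head",
--     ]):
--         return "Technology / Operations"
--
--     # Finance/Admin
--     if any(k in r for k in [
--         "cfo", "chief financial", "finance", "accounts", "controller",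
--         "treasurer", "admin", "administration", "hr", "human resources",
--         "compliance",
--     ]):
--         return "Finance / Administration"
--
--     # Business/Growth
--     if any(k in r for k in [
--         "business development", "bd", "growth", "strategy",
--         "partnership", "sales", "revenue", "commercial",
--         "admissions", "placement",
--     ]):
--         return "Business Development / Growth"
--
--     # Marketing/Brand
--     if any(k in r for k in [
--         "cmo", "chief marketing", "marketing", "brand",
--         "communications", "pr", "digital marketing", "outreach",
--         "social media",
--     ]):
--         return "Marketing / Branding"
--
--     return ""
--
-- def _leaders_to_case2_management(leaders: List[Dict[str, str]]) -> Dict[str, Dict[str, str]]: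
--     mgmt = _empty_case2_management()
--     used = set()
--
--     for it in leaders or []:
--         nm = _norm_text(it.get("name", ""))
--         rl = _norm_text(it.get("role", "")) or _norm_text(it.get("designation", ""))
--         if not nm or not rl:
--             continue
--         b = _map_role_to_bucket(rl)
--         if not b or b in used:
--             continue
--         mgmt[b]["name"] = nm
--         mgmt[b]["designation"] = rl
--         used.add(b)
--         if len(used) >= 5:
--             break
--
--     return mgmt
-- ===== SOURCE B (Python) =====
-- from typing import Any, Dict, List, Optional, Tuple
--
-- def _norm_text(x: Any) -> str:
--     s = "" if x is None else str(x)
--     return " ".join(s.strip().split())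
--
-- BUCKETS = [
--     "Executive Leadership",
--     "Technology / Operations",
--     "Finance / Administration",
--     "Business Development / Growth",
--     "Marketing / Branding",
-- ]
--
-- def _map_role_to_bucket(role: str) -> str:
--     r = _norm_text(role).lower()
--     if not r:
--         return ""
--     if any(k in r for k in [
--         "founder", "co-founder", "cofounder", "ceo", "chief executive",
--         "managing director", "executive director", "director",
--         "chairman", "chairperson", "president", "owner", "proprietor",
--         "principal", "dean", "medical director", "clinical director",
--     ]):
--         return "Executive Leadership"
--     if any(k in r for k in [
--         "cto", "chief technology", "cio", "chief information",
--         "coo", "chief operating", "operations", "it", "technical",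
--         "head of operations", "plant head",
--     ]):
--         return "Technology / Operations"
--     if any(k in r for k in [
--         "cfo", "chief financial", "finance", "accounts", "controller",
--         "treasurer", "admin", "administration", "hr", "human resources",
--         "compliance",
--     ]):
--         return "Finance / Administration"
--     if any(k in r for k in [
--         "business development", "bd", "growth", "strategy",
--         "partnership", "sales", "revenue", "commercial",
--         "admissions", "placement",
--     ]):
--         return "Business Development / Growth"
--     if any(k in r for k in [
--         "cmo", "chief marketing", "marketing", "brand",
--         "communications", "pr", "digital marketing", "outreach",
--         "social media",
--     ]):
--         return "Marketing / Branding"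
--     return ""
--
-- def _pick(it: Dict[str, str]) -> Optional[Tuple[str, str]]:
--     nm = _norm_text(it.get("name", ""))
--     rl = _norm_text(it.get("role", "")) or _norm_text(it.get("designation", ""))
--     if nm and rl:
--         return nm, rl
--     return None
--
-- def _match(b: str, it: Dict[str, str]) -> Optional[Tuple[str, str]]:
--     p = _pick(it)
--     if p is not None and _map_role_to_bucket(p[1]) == b:
--         return p
--     return None
--
-- def _leaders_to_case2_management(leaders: List[Dict[str, str]]) -> Dict[str, Dict[str, str]]:
--     out: Dict[str, Dict[str, str]] = {}
--     for b in BUCKETS: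
--         found = None
--         for it in (leaders or []):
--             found = _match(b, it)
--             if found is not None:
--                 break
--         nm, rl = found if found is not None else ("", "")
--         out[b] = {"name": nm, "designation": rl}
--     return out
-- ===== Notes on version B (the rewrite author's own statement) =====
-- stated objective: alternative
-- what changed: Replaces the single forward pass over leaders with a mutable bucket dict, a used-set and an early break by an outer loop over the five fixed buckets that scans leaders for the first matching one per bucket and builds the result directly.
import Mathlib
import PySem

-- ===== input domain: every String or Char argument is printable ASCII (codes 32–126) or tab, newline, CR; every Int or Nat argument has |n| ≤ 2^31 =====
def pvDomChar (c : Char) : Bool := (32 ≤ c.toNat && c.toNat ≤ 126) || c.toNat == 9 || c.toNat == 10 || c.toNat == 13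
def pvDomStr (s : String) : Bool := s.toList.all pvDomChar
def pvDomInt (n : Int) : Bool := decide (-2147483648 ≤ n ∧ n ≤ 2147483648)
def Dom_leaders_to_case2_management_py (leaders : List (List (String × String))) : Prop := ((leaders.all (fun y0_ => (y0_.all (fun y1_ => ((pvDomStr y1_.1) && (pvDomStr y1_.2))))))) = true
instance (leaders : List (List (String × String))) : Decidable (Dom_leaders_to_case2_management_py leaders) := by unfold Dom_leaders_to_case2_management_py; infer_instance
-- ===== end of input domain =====

-- B assigns leaders to the five management buckets by iterating over the buckets and
-- scanning for each bucket's first matching leader, instead of A's one pass over the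
-- leaders with a mutable dict, a used-set and an early break (objective: alternative).

-- ===== PORT A =====
-- shared module helpers: _norm_text, BUCKETS, _map_role_to_bucket
def pvNorm (s : String) : String :=
  PySem.Str.join " " (PySem.Str.split₀ (PySem.Str.strip s))

def pvBuckets : List String :=
  ["Executive Leadership", "Technology / Operations", "Finance / Administration",
   "Business Development / Growth", "Marketing / Branding"]

def pvMapRole (role : String) : String :=
  let r := PySem.Str.lower (pvNorm role)
  if r = "" then ""
  else if ["founder", "co-founder", "cofounder", "ceo", "chief executive",
           "managing director", "executive director", "director",
           "chairman", "chairperson", "president", "owner", "proprietor",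
           "principal", "dean", "medical director", "clinical director"].any
          (fun k => PySem.Str.isIn k r) then "Executive Leadership"
  else if ["cto", "chief technology", "cio", "chief information",
           "coo", "chief operating", "operations", "it", "technical",
           "head of operations", "plant head"].any
          (fun k => PySem.Str.isIn k r) then "Technology / Operations"
  else if ["cfo", "chief financial", "finance", "accounts", "controller",
           "treasurer", "admin", "administration", "hr", "human resources",
           "compliance"].any
          (fun k => PySem.Str.isIn k r) then "Finance / Administration"
  else if ["business development", "bd", "growth", "strategy",
           "partnership", "sales", "revenue", "commercial",
           "admissions", "placement"].any
          (fun k => PySem.Str.isIn k r) then "Business Development / Growth"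
  else if ["cmo", "chief marketing", "marketing", "brand",
           "communications", "pr", "digital marketing", "outreach",
           "social media"].any
          (fun k => PySem.Str.isIn k r) then "Marketing / Branding"
  else ""

-- the body of A's single for-loop over leaders (state: mgmt dict, used set, break flag)
def pvStepA (st : PySem.Dict String (PySem.Dict String String) × PySem.Set String × Bool)
    (it : List (String × String)) :
    PySem.Dict String (PySem.Dict String String) × PySem.Set String × Bool :=
  if st.2.2 then st
  else
    let mgmt := st.1
    let used := st.2.1
    let nm := pvNorm (PySem.Dict.getD (PySem.Dict.mk it) "name" "")
    let r0 := pvNorm (PySem.Dict.getD (PySem.Dict.mk it) "role" "")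
    let rl := if r0 = "" then pvNorm (PySem.Dict.getD (PySem.Dict.mk it) "designation" "") else r0
    if nm = "" ∨ rl = "" then st
    else
      let b := pvMapRole rl
      if b = "" ∨ PySem.Set.contains used b then st
      else
        let mgmt := mgmt.modify b PySem.Dict.empty (fun d => d.insert "name" nm)
        let mgmt := mgmt.modify b PySem.Dict.empty (fun d => d.insert "designation" rl)
        let used := PySem.Set.add used b
        (mgmt, used, decide (5 ≤ PySem.Set.len used))

def leaders_to_case2_management_py (leaders : List (List (String × String))) :
    List (String × List (String × String)) :=
  let mgmt0 : PySem.Dict String (PySem.Dict String String) :=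
    pvBuckets.foldl (fun d b => d.insert b (PySem.Dict.mk [("name", ""), ("designation", "")]))
      PySem.Dict.empty
  let st := leaders.foldl pvStepA (mgmt0, PySem.Set.empty, false)
  st.1.items.map (fun p => (p.1, p.2.items))

-- ===== PORT B =====
-- helper _pick: the normalized (name, role) of a leader, or None
def pvPick (it : List (String × String)) : Option (String × String) :=
  let nm := pvNorm (PySem.Dict.getD (PySem.Dict.mk it) "name" "")
  let r0 := pvNorm (PySem.Dict.getD (PySem.Dict.mk it) "role" "")
  let rl := if r0 = "" then pvNorm (PySem.Dict.getD (PySem.Dict.mk it) "designation" "") else r0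
  if nm ≠ "" ∧ rl ≠ "" then some (nm, rl) else none

-- helper _match: the leader's (name, role) if it falls in bucket b, else None
def pvMatchB (b : String) (it : List (String × String)) : Option (String × String) :=
  match pvPick it with
  | some p => if pvMapRole p.2 = b then some p else none
  | none => none

def leaders_to_case2_management_py_alt (leaders : List (List (String × String))) :
    List (String × List (String × String)) :=
  pvBuckets.map (fun b =>
    match leaders.findSome? (pvMatchB b) with
    | some p => (b, [("name", p.1), ("designation", p.2)])
    | none => (b, [("name", ""), ("designation", "")]))

-- ===== PRECONDITION & SPEC =====
def Spec_leaders_to_case2_management_py (leaders : List (List (String × String))) (out : List (String × List (String × String))) : Prop := out = leaders_to_case2_management_py_alt leaders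
instance (leaders : List (List (String × String))) (out : List (String × List (String × String))) : Decidable (Spec_leaders_to_case2_management_py leaders out) := by unfold Spec_leaders_to_case2_management_py; infer_instance

-- ===== CLAIM (what is proved, stated in full; the proofs are below) =====
def Claim_equal_leaders_to_case2_management_py : Prop := ∀ (leaders : List (List (String × String))), Dom_leaders_to_case2_management_py leaders → Spec_leaders_to_case2_management_py leaders (leaders_to_case2_management_py leaders)

-- ===== LEMMAS AND PROOFS =====

-- the inner dict a bucket ends up with: empty defaults, or the chosen leader's data
def entryOf : Option (String × String) → List (String × String)
  | none => [("name", ""), ("designation", "")]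
  | some p => [("name", p.1), ("designation", p.2)]

-- the leader B selects for bucket b
def firstFor (b : String) (leaders : List (List (String × String))) : Option (String × String) :=
  leaders.findSome? (pvMatchB b)

-- abstraction invariant: f gives each bucket's current fill; it determines A's whole state
def GoodSt (f : String → Option (String × String))
    (st : PySem.Dict String (PySem.Dict String String) × PySem.Set String × Bool) : Prop :=
  st.1.items = pvBuckets.map (fun b => (b, PySem.Dict.mk (entryOf (f b))))
  ∧ (∀ b ∈ pvBuckets, (b ∈ st.2.1 ↔ (f b).isSome = true))
  ∧ st.2.1.Nodup
  ∧ (∀ x ∈ st.2.1, x ∈ pvBuckets)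
  ∧ (st.2.2 = true → ∀ b ∈ pvBuckets, (f b).isSome = true)

lemma GoodSt_congr {f f' : String → Option (String × String)} {st}
    (hpt : ∀ b ∈ pvBuckets, f b = f' b) (h : GoodSt f st) : GoodSt f' st := by
  obtain ⟨h1, h2, h3, h4, h5⟩ := h
  refine ⟨?_, ?_, h3, h4, ?_⟩
  · rw [h1]; exact List.map_congr_left (fun b hb => by rw [hpt b hb])
  · intro b hb; rw [← hpt b hb]; exact h2 b hb
  · intro hs b hb; rw [← hpt b hb]; exact h5 hs b hb

lemma mapRole_cases (rl : String) : pvMapRole rl = "" ∨ pvMapRole rl ∈ pvBuckets := by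
  unfold pvMapRole
  dsimp only
  split_ifs <;> simp [pvBuckets]

lemma bucket_ne_empty {b : String} (hb : b ∈ pvBuckets) : b ≠ "" := by
  fin_cases hb <;> decide

lemma subset_full (s : List String) (hn : s.Nodup) (hs : ∀ x ∈ s, x ∈ pvBuckets)
    (hl : 5 ≤ s.length) : ∀ b ∈ pvBuckets, b ∈ s := by
  intro b hb
  have h1 : s.toFinset ⊆ pvBuckets.toFinset := by
    intro x hx; rw [List.mem_toFinset] at *; exact hs x hx
  have hcard : pvBuckets.toFinset.card ≤ s.toFinset.card := by
    rw [List.toFinset_card_of_nodup hn]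
    have : pvBuckets.toFinset.card = 5 := by decide
    omega
  have := Finset.eq_of_subset_of_card_le h1 hcard
  rw [← List.mem_toFinset, this, List.mem_toFinset]; exact hb

set_option maxHeartbeats 1000000 in
lemma step_char (f st it) (h : GoodSt f st) :
    GoodSt (fun b => (f b).orElse (fun _ => pvMatchB b it)) (pvStepA st it) := by
  obtain ⟨mgmt, used, stop⟩ := st
  obtain ⟨h1, h2, h3, h4, h5⟩ := h
  by_cases hstop : stop = true
  · have hst : pvStepA (mgmt, used, stop) it = (mgmt, used, stop) := by
      simp [pvStepA, hstop]
    rw [hst]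
    refine GoodSt_congr (f := f) (fun b hb => ?_) ⟨h1, h2, h3, h4, h5⟩
    have hs := h5 hstop b hb
    cases hf : f b
    · rw [hf] at hs; simp at hs
    · simp [Option.orElse]
  · simp only [Bool.not_eq_true] at hstop
    subst hstop
    dsimp only at h1 h2 h3 h4 h5
    simp only [pvStepA, pvMatchB, pvPick]
    generalize pvNorm (PySem.Dict.getD (PySem.Dict.mk it) "name" "") = nm
    generalize pvNorm (PySem.Dict.getD (PySem.Dict.mk it) "role" "") = r0
    generalize pvNorm (PySem.Dict.getD (PySem.Dict.mk it) "designation" "") = ds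
    rw [if_neg (by simp : ¬ (false = true))]
    by_cases hc : nm = "" ∨ (if r0 = "" then ds else r0) = ""
    · have hc' : ¬ (nm ≠ "" ∧ (if r0 = "" then ds else r0) ≠ "") :=
        fun hA => hc.elim (fun e => hA.1 e) (fun e => hA.2 e)
      rw [if_pos hc, if_neg hc']
      refine GoodSt_congr (f := f) (fun b hb => ?_) ⟨h1, h2, h3, h4, h5⟩
      cases hf : f b <;> simp [Option.orElse]
    · have hc' : nm ≠ "" ∧ (if r0 = "" then ds else r0) ≠ "" := by
        push Not at hc; exact hc
      rw [if_neg hc, if_pos hc']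
      set rl := (if r0 = "" then ds else r0) with hrl
      set b0 := pvMapRole rl with hb0def
      by_cases hskip : b0 = "" ∨ used.contains b0 = true
      · rw [if_pos hskip]
        refine GoodSt_congr (f := f) (fun b hb => ?_) ⟨h1, h2, h3, h4, h5⟩
        by_cases hbb : pvMapRole rl = b
        · have hsome : (f b).isSome = true := by
            rcases hskip with he0 | hmem
            · exact absurd (hbb.symm.trans (hb0def ▸ he0)) (bucket_ne_empty hb)
            · have hb0mem : b0 ∈ used := (PySem.Set.contains_iff _ _).mp hmem
              have hbeq : b = b0 := (hb0def.trans hbb).symm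
              exact (h2 b hb).mp (hbeq ▸ hb0mem)
          obtain ⟨v, hv⟩ := Option.isSome_iff_exists.mp hsome
          simp [hv, Option.orElse]
        · cases hf : f b <;> simp [Option.orElse, hbb]
      · rw [if_neg hskip]
        push Not at hskip
        obtain ⟨hb0ne, hcontne⟩ := hskip
        clear_value b0
        have hcontf : used.contains b0 = false := by
          simpa using hcontne
        have hb0B : b0 ∈ pvBuckets := (hb0def ▸ (mapRole_cases rl)).resolve_left hb0ne
        have hb0notmem : b0 ∉ used := fun hm => hcontne ((PySem.Set.contains_iff _ _).mpr hm)
        have hf0 : f b0 = none := by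
          cases hf : f b0 with
          | none => rfl
          | some v =>
              exact absurd ((h2 b0 hb0B).mpr (by simp [hf])) hb0notmem
        have hadd : PySem.Set.add used b0 = used ++ [b0] := by
          simp [PySem.Set.add, hb0notmem]
        refine GoodSt_congr
          (f := fun b => (f b).orElse fun _ => if pvMapRole rl = b then some (nm, rl) else none)
          (fun b hb => rfl) ?_
        have hg0 : ((f b0).orElse fun _ => if pvMapRole rl = b0 then some (nm, rl) else none)
            = some (nm, rl) := by
          rw [hf0, Option.orElse_none, if_pos hb0def.symm]
        have hgne : ∀ b, b ≠ b0 →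
            ((f b).orElse fun _ => if pvMapRole rl = b then some (nm, rl) else none) = f b := by
          intro b hbb
          have hne : ¬ pvMapRole rl = b := fun he => hbb ((hb0def.trans he).symm)
          cases hf : f b with
          | none => rw [Option.orElse_none, if_neg hne]
          | some v => rw [Option.orElse_some]
        have hkeysm : mgmt.keys = pvBuckets := by
          simp [PySem.Dict.keys, h1, Function.comp_def]
        have hnodupk : mgmt.keys.Nodup := by rw [hkeysm]; decide
        have hgetD : ∀ b ∈ pvBuckets, mgmt.getD b PySem.Dict.empty = PySem.Dict.mk (entryOf (f b)) := by
          intro b hb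
          exact PySem.Dict.getD_of_mem_items mgmt (by rw [h1]; exact List.mem_map_of_mem hb)
            hnodupk PySem.Dict.empty
        have hcont : mgmt.contains b0 = true := by
          rw [PySem.Dict.contains_iff_mem_keys, hkeysm]; exact hb0B
        set mgmt2 := ((mgmt.modify b0 PySem.Dict.empty fun d => d.insert "name" nm).modify b0
          PySem.Dict.empty fun d => d.insert "designation" rl) with hm2
        have hm2eq : mgmt2 = mgmt.insert b0
            (PySem.Dict.mk [("name", nm), ("designation", rl)]) := by
          rw [hm2]
          show (mgmt.insert b0 ((mgmt.getD b0 PySem.Dict.empty).insert "name" nm)).insert b0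
              (((mgmt.insert b0 ((mgmt.getD b0 PySem.Dict.empty).insert "name" nm)).getD b0
                PySem.Dict.empty).insert "designation" rl) = _
          rw [PySem.Dict.insert_insert_self, PySem.Dict.getD_insert, if_pos rfl,
            hgetD b0 hb0B, hf0]
          rfl
        have hkeys2 : mgmt2.keys = pvBuckets := by
          rw [hm2eq, PySem.Dict.keys_insert_of_contains mgmt _ hcont, hkeysm]
        have hnodup2 : mgmt2.keys.Nodup := by rw [hkeys2]; decide
        have hitems2 : mgmt2.items = pvBuckets.map (fun b => (b,
            PySem.Dict.mk (entryOf ((f b).orElse fun _ =>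
              if pvMapRole rl = b then some (nm, rl) else none)))) := by
          rw [PySem.Dict.items_eq_map_keys mgmt2 hnodup2 PySem.Dict.empty, hkeys2]
          refine List.map_congr_left (fun b hb => ?_)
          rw [hm2eq, PySem.Dict.getD_insert]
          by_cases hbb : b = b0
          · subst hbb
            rw [if_pos rfl, hg0]
            rfl
          · rw [if_neg hbb, hgetD b hb, hgne b hbb]
        have hnodupA : (used ++ [b0]).Nodup := by
          refine List.Nodup.append h3 (List.nodup_singleton _) ?_
          intro a ha hb
          rw [List.mem_singleton.mp hb] at ha
          exact hb0notmem ha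
        have hsubA : ∀ x ∈ used ++ [b0], x ∈ pvBuckets := by
          intro x hx
          rcases List.mem_append.mp hx with hx | hx
          · exact h4 x hx
          · rw [List.mem_singleton.mp hx]; exact hb0B
        refine ⟨hitems2, ?_, ?_, ?_, ?_⟩
        · intro b hb
          dsimp only
          rw [hadd]
          by_cases hbb : b = b0
          · subst hbb
            rw [hg0]
            simp
          · rw [hgne b hbb]
            simp only [List.mem_append, List.mem_singleton]
            constructor
            · rintro (hmem | rfl)
              · exact (h2 b hb).mp hmem
              · exact absurd rfl hbb
            · intro hs; exact Or.inl ((h2 b hb).mpr hs)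
        · rw [hadd]; exact hnodupA
        · rw [hadd]; exact hsubA
        · intro hd b hb
          dsimp only
          have hlen : 5 ≤ (PySem.Set.add used b0).length := by
            simpa [PySem.Set.len] using of_decide_eq_true hd
          have hmem : b ∈ PySem.Set.add used b0 := by
            refine subset_full _ ?_ ?_ hlen b hb
            · rw [hadd]; exact hnodupA
            · rw [hadd]; exact hsubA
          rw [hadd] at hmem
          rcases List.mem_append.mp hmem with hmem | hmem
          · rcases eq_or_ne b b0 with rfl | hbb
            · rw [hg0]; rfl
            · rw [hgne b hbb]; exact (h2 b hb).mp hmem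
          · have hb0b : b = b0 := List.mem_singleton.mp hmem
            subst hb0b
            rw [hg0]; rfl

lemma fold_char (leaders) (f st) (h : GoodSt f st) :
    GoodSt (fun b => (f b).orElse (fun _ => firstFor b leaders)) (leaders.foldl pvStepA st) := by
  induction leaders generalizing f st with
  | nil =>
      simp only [List.foldl_nil]
      refine GoodSt_congr (f := f) (fun b _ => ?_) h
      cases hf : f b <;> simp [firstFor, Option.orElse, hf]
  | cons it rest ih =>
      simp only [List.foldl_cons]
      have h1 := step_char f st it h
      have h2 := ih _ _ h1
      refine GoodSt_congr (fun b _ => ?_) h2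
      cases hf : f b <;>
        simp [firstFor, List.findSome?_cons, Option.orElse, hf] <;>
        cases hm : pvMatchB b it <;> simp [Option.orElse, hm]

theorem leaders_to_case2_management_py_spec : Claim_equal_leaders_to_case2_management_py := by
  intro leaders _
  unfold Spec_leaders_to_case2_management_py
  have hinit : GoodSt (fun _ => none)
      (pvBuckets.foldl (fun d b => d.insert b (PySem.Dict.mk [("name", ""), ("designation", "")]))
        PySem.Dict.empty, PySem.Set.empty, false) := by
    refine ⟨by rfl, ?_, List.nodup_nil, ?_, ?_⟩
    · intro b hb; simp [PySem.Set.empty]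
    · intro x hx; simp [PySem.Set.empty] at hx
    · intro hfalse; simp at hfalse
  have hres := fold_char leaders _ _ hinit
  obtain ⟨hi, -, -, -, -⟩ := hres
  unfold leaders_to_case2_management_py
  dsimp only
  rw [hi, List.map_map]
  unfold leaders_to_case2_management_py_alt
  refine List.map_congr_left (fun b hb => ?_)
  rw [show leaders.findSome? (pvMatchB b) = firstFor b leaders from rfl]
  cases hfo : firstFor b leaders with
  | none => simp [hfo, entryOf]
  | some p => simp [hfo, entryOf]
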